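-- pv_equiv track=rewrite | github.com/DzawilUqul/PlayFair-Cipher-App | KuisPlayFair.py | format_message_decrypt
-- ===== SOURCE A (Python) =====
-- def format_message_decrypt(msg):
--     # Mengganti huruf 'y' yang seharusnya menjadi 'q' kembali
--     msg = msg.replace('y', 'q')
--
--     formatted_msg = ''
--     i = 0
--     while i < len(msg):
--         char1 = msg[i]
--         if char1.isalpha():  # Mengecek apakah karakter adalah huruf alfabet
--             i += 1
--             if i < len(msg):
--                 char2 = msg[i]
--                 if char2.isalpha():  # Mengecek apakah karakter berikutnya juga huruf alfabet
--                     # Pasangan huruf alfabet, tambahkan ke formatted_msg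
--                     formatted_msg += char1 + char2
--                     i += 1  # Langsung lanjut ke karakter berikutnya
--                 else:
--                     # Karakter non-alfabet ditemukan, lanjutkan ke karakter berikutnya
--                     i += 1
--             else:
--                 # Karakter terakhir adalah huruf alfabet tunggal, tambahkan ke formatted_msg
--                 formatted_msg += char1
--                 i += 1
--         else:
--             # Karakter non-alfabet ditemukan, lanjutkan ke karakter berikutnya
--             i += 1
--
--     # Menghapus karakter 'w' yang tidak perlu jika panjang pesan ganjil
--     if len(formatted_msg) % 2 != 0:
--         formatted_msg = formatted_msg[:-1]
--
--     return formatted_msg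
-- ===== SOURCE B (Python) =====
-- def format_message_decrypt(msg):
--     msg = msg.replace('y', 'q')
--     # Stage 1: blank out every non-alphabetic character.
--     blanked = ''.join(c if c.isalpha() else ' ' for c in msg)
--     # Stage 2: the maximal alphabetic runs are exactly the whitespace-split words.
--     runs = blanked.split()
--     # Stage 3: within each run, a trailing unpaired letter is dropped.
--     return ''.join(r[:len(r) - len(r) % 2] for r in runs)
-- ===== Notes on version B (the rewrite author's own statement) =====
-- stated objective: simpler
-- what changed: Replaces A's single index-walking while loop that peeks two positions ahead, builds the result by quadratic string += and finally trims on odd length, by three staged whole-string passes: blank every non-letter to a space, split() the result into the maximal alphabetic runs, and join the runs each truncated to even length.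
import Mathlib
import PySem

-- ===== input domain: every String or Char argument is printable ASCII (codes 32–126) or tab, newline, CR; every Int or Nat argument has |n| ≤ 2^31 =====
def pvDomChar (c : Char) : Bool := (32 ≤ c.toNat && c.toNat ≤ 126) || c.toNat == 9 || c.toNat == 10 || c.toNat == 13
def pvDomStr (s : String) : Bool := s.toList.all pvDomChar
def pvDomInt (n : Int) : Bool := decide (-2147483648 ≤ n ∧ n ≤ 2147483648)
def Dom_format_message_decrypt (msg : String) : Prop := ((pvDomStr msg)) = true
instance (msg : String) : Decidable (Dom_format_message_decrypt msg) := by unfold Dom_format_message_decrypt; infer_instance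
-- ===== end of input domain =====

-- B replaces A's look-two-ahead index loop (plus final odd-length trim) by three staged
-- string passes: blank out non-letters, split into maximal alphabetic runs, truncate each
-- run to even length and join; objective: simpler.

-- ===== PORT A =====
-- A's while loop over index i; termination on cs.length - i. msg[i] with 0 ≤ i < len is direct
-- indexing; 'formatted_msg[:-1]' is List.dropLast (exact for [:-1] on any list).
def pvLoopA (cs : List Char) (i : Nat) (acc : List Char) : List Char :=
  if h : i < cs.length then
    let char1 := cs[i]
    if PySem.Chars.isalpha char1 then
      if h2 : i + 1 < cs.length then
        let char2 := cs[i + 1]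
        if PySem.Chars.isalpha char2 then
          pvLoopA cs (i + 2) (acc ++ [char1, char2])
        else
          pvLoopA cs (i + 2) acc
      else
        acc ++ [char1]
    else
      pvLoopA cs (i + 1) acc
  else acc
termination_by cs.length - i

-- 'if len % 2 != 0: formatted_msg = formatted_msg[:-1]' ([:-1] = dropLast, exact on any list)
def pvTrim (formatted : List Char) : String :=
  String.ofList (if formatted.length % 2 ≠ 0 then formatted.dropLast else formatted)

def format_message_decrypt (msg : String) : String :=
  pvTrim (pvLoopA (PySem.Str.replace msg "y" "q").toList 0 [])

-- ===== PORT B =====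
-- ''.join(c if c.isalpha() else ' ' for c in msg)
def pvBlank (c : Char) : Char := if PySem.Chars.isalpha c then c else ' '

-- r[:len(r) - len(r) % 2]  (slice with a Nat bound = take)
def pvTrunc (r : List Char) : List Char := r.take (r.length - r.length % 2)

def format_message_decrypt_alt (msg : String) : String :=
  String.ofList (PySem.Chars.join []
    ((PySem.Chars.split₀ ((PySem.Str.replace msg "y" "q").toList.map pvBlank)).map pvTrunc))

-- ===== PRECONDITION & SPEC =====
def Spec_format_message_decrypt (msg : String) (out : String) : Prop := out = format_message_decrypt_alt msg
instance (msg : String) (out : String) : Decidable (Spec_format_message_decrypt msg out) := by unfold Spec_format_message_decrypt; infer_instance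

-- ===== CLAIM (what is proved, stated in full; the proofs are below) =====
def Claim_equal_format_message_decrypt : Prop := ∀ (msg : String), Dom_format_message_decrypt msg → Spec_format_message_decrypt msg (format_message_decrypt msg)

-- ===== LEMMAS AND PROOFS =====

-- a letter is never whitespace
lemma pvAlpha_not_space (c : Char) (h : PySem.Chars.isalpha c = true) :
    PySem.Chars.isspace c = false := by
  simp [PySem.Chars.isalpha, PySem.Chars.isspace, PySem.Chars.isupper, PySem.Chars.islower,
    Char.le_def, UInt32.le_iff_toNat_le] at *
  omega

-- the maximal alphabetic runs of a character list
def pvRuns : List Char → List (List Char)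
  | [] => []
  | c :: rest =>
    if PySem.Chars.isalpha c then
      (c :: rest.takeWhile PySem.Chars.isalpha) :: pvRuns (rest.dropWhile PySem.Chars.isalpha)
    else pvRuns rest
termination_by cs => cs.length
decreasing_by
  · have := List.length_dropWhile_le (p := PySem.Chars.isalpha) rest; simp; omega
  · simp

-- split() of the blanked string computes exactly the alphabetic runs
lemma pvGo_blank (cs : List Char) : ∀ cur acc,
    PySem.Chars.split₀.go (cs.map pvBlank) cur acc =
      if cur.isEmpty then acc.reverse ++ pvRuns cs
      else acc.reverse ++ (cur.reverse ++ cs.takeWhile PySem.Chars.isalpha) ::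
             pvRuns (cs.dropWhile PySem.Chars.isalpha) := by
  induction cs with
  | nil =>
    intro cur acc
    cases cur with
    | nil => simp [PySem.Chars.split₀.go, pvRuns]
    | cons a l => simp [PySem.Chars.split₀.go, pvRuns]
  | cons c rest ih =>
    intro cur acc
    by_cases hc : PySem.Chars.isalpha c = true
    · have hs : PySem.Chars.isspace (pvBlank c) = false := by
        simpa [pvBlank, hc] using pvAlpha_not_space c hc
      have h1 : PySem.Chars.split₀.go ((c :: rest).map pvBlank) cur acc
          = PySem.Chars.split₀.go (rest.map pvBlank) (pvBlank c :: cur) acc := by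
        simp [PySem.Chars.split₀.go, hs]
      rw [h1, ih]
      have hb : pvBlank c = c := by simp [pvBlank, hc]
      cases cur with
      | nil => simp [pvRuns, hc, hb]
      | cons a l => simp [hc, hb]
    · have hs : PySem.Chars.isspace (pvBlank c) = true := by
        rw [show pvBlank c = ' ' from by simp [pvBlank, hc]]; decide
      cases cur with
      | nil =>
        have h1 : PySem.Chars.split₀.go ((c :: rest).map pvBlank) [] acc
            = PySem.Chars.split₀.go (rest.map pvBlank) [] acc := by
          simp [PySem.Chars.split₀.go, hs]
        rw [h1, ih]
        simp [pvRuns, hc]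
      | cons a l =>
        have h1 : PySem.Chars.split₀.go ((c :: rest).map pvBlank) (a :: l) acc
            = PySem.Chars.split₀.go (rest.map pvBlank) [] ((a :: l).reverse :: acc) := by
          simp [PySem.Chars.split₀.go, hs]
        rw [h1, ih]
        simp [pvRuns, hc]

lemma pvSplit_blank (cs : List Char) :
    PySem.Chars.split₀ (cs.map pvBlank) = pvRuns cs := by
  have := pvGo_blank cs [] []
  simpa [PySem.Chars.split₀] using this

lemma pvJoin_nil (parts : List (List Char)) :
    PySem.Chars.join [] parts = parts.flatten := by
  induction parts with
  | nil => rfl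
  | cons p ps ih =>
    simp [PySem.Chars.join, List.intercalate] at *
    cases ps with
    | nil => simp
    | cons q qs => simpa [List.intersperse] using ih

-- the pending-pair state machine that characterises A's loop (proof device only)
def pvLoopB (cs : List Char) (pending : Option Char) (acc : List Char) : List Char :=
  match cs with
  | [] => acc
  | c :: rest =>
    match pending with
    | none => if PySem.Chars.isalpha c then pvLoopB rest (some c) acc else pvLoopB rest none acc
    | some p =>
      if PySem.Chars.isalpha c then pvLoopB rest none (acc ++ [p, c])
      else pvLoopB rest none acc

-- the lone trailing alphabetic char A appends when the input ends mid-pair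
def pvLone (cs : List Char) : List Char :=
  match cs with
  | [] => []
  | [c] => if PySem.Chars.isalpha c then [c] else []
  | c :: d :: rest => if PySem.Chars.isalpha c then pvLone rest else pvLone (d :: rest)

lemma pvLoopB_length_mod (cs : List Char) (p : Option Char) (acc : List Char) :
    (pvLoopB cs p acc).length % 2 = acc.length % 2 := by
  induction cs generalizing p acc with
  | nil => simp [pvLoopB]
  | cons c rest ih =>
    cases p with
    | none =>
      by_cases h : PySem.Chars.isalpha c
      · rw [show pvLoopB (c :: rest) none acc = pvLoopB rest (some c) acc from by
          simp [pvLoopB, h]]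
        exact ih _ _
      · rw [show pvLoopB (c :: rest) none acc = pvLoopB rest none acc from by
          simp [pvLoopB, h]]
        exact ih _ _
    | some q =>
      simp only [pvLoopB]
      split_ifs with h
      · rw [ih]; simp
      · exact ih _ _

lemma pvLone_small (cs : List Char) : pvLone cs = [] ∨ ∃ c, pvLone cs = [c] := by
  induction cs using pvLone.induct with
  | case1 => left; rfl
  | case2 c h => right; exact ⟨c, by simp [pvLone, h]⟩
  | case3 c h => left; simp [pvLone, h]
  | case4 c d rest h ih => simpa [pvLone, h] using ih
  | case5 c d rest h ih => simpa [pvLone, h] using ih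

lemma pvLoopA_eq (cs : List Char) (i : Nat) (acc : List Char) :
    pvLoopA cs i acc = pvLoopB (cs.drop i) none acc ++ pvLone (cs.drop i) := by
  induction i, acc using pvLoopA.induct cs with
  | case1 i acc h char1 ha1 h2 char2 ha2 ih =>
    have ha1' : PySem.Chars.isalpha cs[i] = true := ha1
    have ha2' : PySem.Chars.isalpha cs[i+1] = true := ha2
    have hd : cs.drop i = cs[i] :: cs[i+1] :: cs.drop (i+2) := by
      rw [List.drop_eq_getElem_cons h, List.drop_eq_getElem_cons h2]
    rw [pvLoopA, dif_pos h, if_pos ha1', dif_pos h2, if_pos ha2', ih, hd]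
    simp only [pvLoopB, pvLone, ha1', ha2', if_pos]
    rfl
  | case2 i acc h char1 ha1 h2 char2 ha2 ih =>
    have ha1' : PySem.Chars.isalpha cs[i] = true := ha1
    have ha2' : ¬ PySem.Chars.isalpha cs[i+1] = true := ha2
    have hd : cs.drop i = cs[i] :: cs[i+1] :: cs.drop (i+2) := by
      rw [List.drop_eq_getElem_cons h, List.drop_eq_getElem_cons h2]
    rw [pvLoopA, dif_pos h, if_pos ha1', dif_pos h2, if_neg ha2', ih, hd]
    simp [pvLoopB, pvLone, ha1', ha2']
  | case3 i acc h char1 ha1 h2 =>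
    have ha1' : PySem.Chars.isalpha cs[i] = true := ha1
    have hi : i + 1 = cs.length := by omega
    have hd : cs.drop i = [cs[i]] := by
      rw [List.drop_eq_getElem_cons h]
      simp [hi]
    rw [pvLoopA, dif_pos h, if_pos ha1', dif_neg h2, hd]
    simp [pvLoopB, pvLone, ha1']
  | case4 i acc h char1 ha1 ih =>
    have ha1' : ¬ PySem.Chars.isalpha cs[i] = true := ha1
    have hd : cs.drop i = cs[i] :: cs.drop (i+1) := List.drop_eq_getElem_cons h
    rw [pvLoopA, dif_pos h, if_neg ha1', ih, hd]
    cases hrest : cs.drop (i+1) with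
    | nil => simp [pvLoopB, pvLone, ha1']
    | cons d rest => simp [pvLoopB, pvLone, ha1']
  | case5 i acc h =>
    have hd : cs.drop i = [] := List.drop_eq_nil_of_le (by omega)
    rw [pvLoopA, dif_neg h, hd]
    simp [pvLoopB, pvLone]

-- consuming one all-alphabetic run: the machine emits the even prefix of the run
lemma pvLoopB_run (t : List Char) :
    (∀ c ∈ t, PySem.Chars.isalpha c = true) →
    ∀ rest acc, (∀ d rest', rest = d :: rest' → PySem.Chars.isalpha d = false) →
      pvLoopB (t ++ rest) none acc = pvLoopB rest none (acc ++ pvTrunc t) := by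
  induction t using pvLone.induct with
  | case1 => intro _ rest acc _; simp [pvTrunc]
  | case2 a _ =>
    intro ht rest acc hrest
    have ha : PySem.Chars.isalpha a = true := ht a (by simp)
    cases rest with
    | nil => simp [pvLoopB, ha, pvTrunc]
    | cons d rest' =>
      have hd := hrest d rest' rfl
      simp [pvLoopB, ha, hd, pvTrunc]
  | case3 a ha =>
    intro ht rest acc hrest
    exact absurd (ht a (by simp)) ha
  | case5 a b t' ha ih =>
    intro ht rest acc hrest
    exact absurd (ht a (by simp)) ha
  | case4 a b t' _ ih =>
    intro ht rest acc hrest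
    have ha : PySem.Chars.isalpha a = true := ht a (by simp)
    have hb : PySem.Chars.isalpha b = true := ht b (by simp)
    have h1 : pvLoopB ((a :: b :: t') ++ rest) none acc
        = pvLoopB (t' ++ rest) none (acc ++ [a, b]) := by
      simp [pvLoopB, ha, hb]
    rw [h1, ih (fun c hc => ht c (by simp [hc])) rest _ hrest]
    have htr : pvTrunc (a :: b :: t') = a :: b :: pvTrunc t' := by
      simp only [pvTrunc, List.length_cons]
      have h2 : t'.length + 1 + 1 - (t'.length + 1 + 1) % 2
          = (t'.length - t'.length % 2) + 2 := by omega
      rw [h2]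
      rfl
    rw [htr]
    simp

-- the machine computes the even prefixes of the maximal runs, concatenated
lemma pvLoopB_runs (cs : List Char) : ∀ acc,
    pvLoopB cs none acc = acc ++ ((pvRuns cs).map pvTrunc).flatten := by
  induction cs using pvRuns.induct with
  | case1 => intro acc; simp [pvLoopB, pvRuns]
  | case2 c rest hc ih =>
    intro acc
    have hsplit : c :: rest
        = (c :: rest.takeWhile PySem.Chars.isalpha) ++ rest.dropWhile PySem.Chars.isalpha := by
      simp [List.takeWhile_append_dropWhile]
    have hall : ∀ x ∈ c :: rest.takeWhile PySem.Chars.isalpha,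
        PySem.Chars.isalpha x = true := by
      intro x hx
      rcases List.mem_cons.mp hx with h | h
      · exact h ▸ hc
      · exact List.mem_takeWhile_imp h
    have hrest : ∀ d rest', rest.dropWhile PySem.Chars.isalpha = d :: rest'
        → PySem.Chars.isalpha d = false := by
      intro d rest' hdr
      have := List.head_dropWhile_not (p := PySem.Chars.isalpha) (l := rest)
        (by simp [hdr])
      simpa [hdr] using this
    rw [hsplit, pvLoopB_run _ hall _ acc hrest, ih]
    simp [pvRuns, hc]
  | case3 c rest hc ih =>
    intro acc
    have h1 : pvLoopB (c :: rest) none acc = pvLoopB rest none acc := by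
      simp [pvLoopB, hc]
    rw [h1, ih]
    simp [pvRuns, hc]

-- ===== VERDICT (by name: the statement is the Claim_ definition above) =====
theorem format_message_decrypt_spec : Claim_equal_format_message_decrypt := by
  intro msg _
  unfold Spec_format_message_decrypt format_message_decrypt format_message_decrypt_alt pvTrim
  set cs := (PySem.Str.replace msg "y" "q").toList with hcs
  have halt : PySem.Chars.join [] ((PySem.Chars.split₀ (cs.map pvBlank)).map pvTrunc)
      = pvLoopB cs none [] := by
    rw [pvSplit_blank, pvJoin_nil, pvLoopB_runs cs []]
    simp
  rw [halt]
  have h := pvLoopA_eq cs 0 []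
  simp only [List.drop_zero] at h
  have hmod := pvLoopB_length_mod cs none []
  rcases pvLone_small cs with hl | ⟨c, hl⟩
  · rw [h, hl]
    simp only [List.append_nil]
    rw [if_neg (by simp at hmod ⊢; omega)]
  · rw [h, hl]
    rw [if_pos (by simp at hmod ⊢; omega)]
    simp
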